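-- pv_equiv track=rewrite | github.com/LabOrchestrator/LabOrchestratorLib | src/lab_orchestrator_lib/model/model.py | check_dns_name
-- ===== SOURCE A (Python) =====
-- def check_dns_name(name) -> bool:
--     """Checks if the name is a valid dns label.
--
--     Definition: https://kubernetes.io/docs/concepts/overview/working-with-objects/names/#dns-label-names
--
--     :param name: The name to check.
--     :return: If the dns name is valid.
--     """
--     alphabetic = "abcdefghijklmnopqrstuvwxyz"
--     alphanumeric = alphabetic + "1234567890"
--     allowed_chars = alphanumeric + "-"
--     if len(name) <= 0:
--         return False
--     if len(name) > 63:
--         return False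
--     # contain only lowercase alphanumeric characters or '-'
--     for char in name:
--         if char not in allowed_chars:
--             return False
--     # start with an alphabetic character
--     if name[0] not in alphabetic:
--         return False
--     # end with an alphanumeric character
--     if name[len(name) - 1] not in alphanumeric:
--         return False
--     return True
-- ===== SOURCE B (Python) =====
-- # Recursive-descent matcher for the DNS-label grammar  label := [a-z] tail,
-- # tail := "" | allowed* alnum  -- instead of A's scan-then-endpoint-checks.
-- def check_dns_name(name) -> bool:
--     n = len(name)
--     if n <= 0 or n > 63:
--         return False
--     if name[0] not in "abcdefghijklmnopqrstuvwxyz":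
--         return False
--     return _dns_tail_ok(name[1:])
--
-- def _dns_tail_ok(s):
--     if s == "":
--         return True
--     if len(s) == 1:
--         return s in "abcdefghijklmnopqrstuvwxyz0123456789"
--     return s[0] in "abcdefghijklmnopqrstuvwxyz0123456789-" and _dns_tail_ok(s[1:])
-- ===== Notes on version B (the rewrite author's own statement) =====
-- stated objective: alternative
-- what changed: Replaced A's whole-string allowed-character scan followed by separate first- and last-position index checks with a recursive-descent matcher for the label grammar ([a-z] then: empty, or allowed* ending in alphanumeric), consuming the string once left to right.
import Mathlib
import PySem

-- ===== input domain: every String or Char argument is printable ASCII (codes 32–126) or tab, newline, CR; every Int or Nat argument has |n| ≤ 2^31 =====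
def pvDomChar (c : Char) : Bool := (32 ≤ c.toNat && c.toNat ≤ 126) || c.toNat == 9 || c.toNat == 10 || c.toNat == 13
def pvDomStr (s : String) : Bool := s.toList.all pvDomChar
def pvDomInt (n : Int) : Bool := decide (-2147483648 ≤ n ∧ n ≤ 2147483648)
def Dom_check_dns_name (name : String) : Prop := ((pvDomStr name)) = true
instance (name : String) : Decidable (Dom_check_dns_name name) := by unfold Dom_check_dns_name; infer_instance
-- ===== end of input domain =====

-- B replaces A's whole-string character scan plus separate first/last-position checks by a
-- recursive-descent matcher for the grammar  label := [a-z] tail,  tail := "" | allowed* alnum  (objective: alternative).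

-- ===== PORT A =====
-- the 'for char in name: if char not in allowed_chars: return False' loop
-- ('in' on a length-1 string is exactly character membership, ported as list membership)
def dnsLoopA (allowed : List Char) : List Char → Bool
  | [] => true
  | c :: rest => if c ∉ allowed then false else dnsLoopA allowed rest

def check_dns_name (name : String) : Bool :=
  let alphabetic := "abcdefghijklmnopqrstuvwxyz".toList
  let alphanumeric := alphabetic ++ "1234567890".toList
  let allowed_chars := alphanumeric ++ "-".toList
  if PySem.Str.len name ≤ 0 then false
  else if PySem.Str.len name > 63 then false
  else if ¬ dnsLoopA allowed_chars name.toList then false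
  else
    match PySem.Str.pyGet? name 0 with
    | none => false   -- unreachable: length > 0 here
    | some c0 =>
      if c0 ∉ alphabetic then false
      else
        match PySem.Str.pyGet? name (PySem.Str.len name - 1) with
        | none => false  -- unreachable: length > 0 here
        | some cl => if cl ∉ alphanumeric then false else true

-- ===== PORT B =====
def dnsAlpha : List Char := "abcdefghijklmnopqrstuvwxyz".toList
def dnsAlnum : List Char := "abcdefghijklmnopqrstuvwxyz0123456789".toList
def dnsAllowedB : List Char := "abcdefghijklmnopqrstuvwxyz0123456789-".toList

-- _dns_tail_ok
def dnsTailOk : List Char → Bool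
  | [] => true
  | [c] => c ∈ dnsAlnum
  | c :: rest => (c ∈ dnsAllowedB) && dnsTailOk rest

def check_dns_name_alt (name : String) : Bool :=
  let n := PySem.Str.len name
  if n ≤ 0 || n > 63 then false
  else
    match name.toList with
    | [] => false   -- unreachable: n > 0 here
    | c :: rest => if c ∉ dnsAlpha then false else dnsTailOk rest

-- ===== PRECONDITION & SPEC =====
def Spec_check_dns_name (name : String) (out : Bool) : Prop := out = check_dns_name_alt name
instance (name : String) (out : Bool) : Decidable (Spec_check_dns_name name out) := by unfold Spec_check_dns_name; infer_instance

-- ===== CLAIM (what is proved, stated in full; the proofs are below) =====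
def Claim_equal_check_dns_name : Prop := ∀ (name : String), Dom_check_dns_name name → Spec_check_dns_name name (check_dns_name name)

-- ===== LEMMAS AND PROOFS =====

-- list-level mirrors of the two ports (proof helpers only)
def dnsACore (l : List Char) : Bool :=
  if (l.length : Int) ≤ 0 then false
  else if (l.length : Int) > 63 then false
  else if ¬ dnsLoopA ("abcdefghijklmnopqrstuvwxyz".toList ++ "1234567890".toList ++ "-".toList) l then false
  else
    match PySem.Chars.pyGet? l 0 with
    | none => false
    | some c0 =>
      if c0 ∉ "abcdefghijklmnopqrstuvwxyz".toList then false
      else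
        match PySem.Chars.pyGet? l ((l.length : Int) - 1) with
        | none => false
        | some cl => if cl ∉ "abcdefghijklmnopqrstuvwxyz".toList ++ "1234567890".toList then false else true

def dnsBCore (l : List Char) : Bool :=
  if (l.length : Int) ≤ 0 || (l.length : Int) > 63 then false
  else
    match l with
    | [] => false
    | c :: rest => if c ∉ dnsAlpha then false else dnsTailOk rest

lemma check_dns_name_eq_core (name : String) : check_dns_name name = dnsACore name.toList := by
  unfold check_dns_name dnsACore
  simp only [PySem.Str.len_eq, PySem.Str.pyGet?]

lemma check_dns_name_alt_eq_core (name : String) : check_dns_name_alt name = dnsBCore name.toList := by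
  unfold check_dns_name_alt dnsBCore
  simp only [PySem.Str.len_eq]
  rfl

lemma alpha_sub_alnum {x : Char} (h : x ∈ dnsAlpha) : x ∈ dnsAlnum := by
  have he : dnsAlnum = dnsAlpha ++ "0123456789".toList := by decide
  rw [he]; exact List.mem_append_left _ h

lemma alnum_sub_allowed {x : Char} (h : x ∈ dnsAlnum) : x ∈ dnsAllowedB := by
  have he : dnsAllowedB = dnsAlnum ++ "-".toList := by decide
  rw [he]; exact List.mem_append_left _ h

lemma mem_allowed_iff (x : Char) :
    x ∈ ("abcdefghijklmnopqrstuvwxyz".toList ++ "1234567890".toList ++ "-".toList) ↔ x ∈ dnsAllowedB := by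
  have h : ("abcdefghijklmnopqrstuvwxyz".toList ++ "1234567890".toList ++ "-".toList).Perm dnsAllowedB := by decide
  exact h.mem_iff

lemma mem_alnum_iff (x : Char) :
    x ∈ ("abcdefghijklmnopqrstuvwxyz".toList ++ "1234567890".toList) ↔ x ∈ dnsAlnum := by
  have h : ("abcdefghijklmnopqrstuvwxyz".toList ++ "1234567890".toList).Perm dnsAlnum := by decide
  exact h.mem_iff

lemma dnsLoopA_eq_all (allowed l) : dnsLoopA allowed l = l.all (fun c => decide (c ∈ allowed)) := by
  induction l with
  | nil => rfl
  | cons c rest ih => by_cases h : c ∈ allowed <;> simp [dnsLoopA, h, ih]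

lemma dnsTailOk_eq (rest : List Char) :
    dnsTailOk rest =
      (rest.all (fun x => decide (x ∈ dnsAllowedB)) &&
        (match rest.getLast? with
         | none => true
         | some x => decide (x ∈ dnsAlnum))) := by
  induction rest with
  | nil => rfl
  | cons c rest ih =>
    cases rest with
    | nil =>
      by_cases h : c ∈ dnsAlnum
      · simp [dnsTailOk, h, alnum_sub_allowed h]
      · by_cases h2 : c ∈ dnsAllowedB <;> simp [dnsTailOk, h, h2]
    | cons d t =>
      simp only [dnsTailOk, ih, List.getLast?_cons_cons]
      by_cases h : c ∈ dnsAllowedB <;> simp [h, Bool.and_assoc]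

lemma pyGet?_zero (c : Char) (rest : List Char) :
    PySem.Chars.pyGet? (c :: rest) 0 = some c := by
  simp [PySem.Chars.pyGet?, PySem.List.pyGet?, PySem.List.pyIdx?]

lemma pyGet?_last (l : List Char) (h : l ≠ []) :
    PySem.Chars.pyGet? l ((l.length : Int) - 1) = l.getLast? := by
  have hlen : 0 < l.length := List.length_pos_iff.mpr h
  have hcast : ((l.length : Int) - 1) = ((l.length - 1 : Nat) : Int) := by omega
  rw [PySem.Chars.pyGet?, hcast, PySem.List.pyGet?_natCast, List.getLast?_eq_getElem?]

lemma ifchain1 (q : Prop) [Decidable q] (t : Bool) : (if ¬ q then false else t) = (decide q && t) := by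
  by_cases hq : q <;> simp [hq]

lemma ifchain3 (b : Bool) (q p : Prop) [Decidable q] [Decidable p] :
    (if ¬ b = true then false else if ¬ q then false else if ¬ p then false else true)
      = (b && (decide q && decide p)) := by
  by_cases hb : b <;> by_cases hq : q <;> by_cases hp : p <;> simp [hb, hq, hp]

lemma core_eq (l : List Char) : dnsACore l = dnsBCore l := by
  unfold dnsACore dnsBCore
  cases l with
  | nil => rfl
  | cons c rest =>
    have h0 : ¬ (((c :: rest).length : Int) ≤ 0) := by simp
    by_cases h63 : ((c :: rest).length : Int) > 63
    · have hor : (decide (((c :: rest).length : Int) ≤ 0) || decide (((c :: rest).length : Int) > 63)) = true := by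
        simp only [Bool.or_eq_true, decide_eq_true_eq]; right; exact h63
      rw [if_neg h0, if_pos h63, hor, if_pos rfl]
    · have hor : (decide (((c :: rest).length : Int) ≤ 0) || decide (((c :: rest).length : Int) > 63)) = false := by
        simp only [Bool.or_eq_false_iff, decide_eq_false_iff_not]; exact ⟨h0, h63⟩
      rw [if_neg h0, if_neg h63, hor, if_neg Bool.false_ne_true,
        pyGet?_zero, pyGet?_last (c :: rest) (List.cons_ne_nil c rest)]
      obtain ⟨x, hx⟩ := Option.isSome_iff_exists.mp (List.getLast?_isSome.mpr (List.cons_ne_nil c rest))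
      rw [hx]
      simp only []
      rw [ifchain3, ifchain1, dnsLoopA_eq_all,
        show (fun y => decide (y ∈ ("abcdefghijklmnopqrstuvwxyz".toList ++ "1234567890".toList ++ "-".toList)))
            = (fun y => decide (y ∈ dnsAllowedB)) from
          funext fun y => by rw [decide_eq_decide]; exact mem_allowed_iff y,
        show decide (x ∈ ("abcdefghijklmnopqrstuvwxyz".toList ++ "1234567890".toList)) = decide (x ∈ dnsAlnum) from
          by rw [decide_eq_decide]; exact mem_alnum_iff x,
        show "abcdefghijklmnopqrstuvwxyz".toList = dnsAlpha from rfl]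
      by_cases hc : c ∈ dnsAlpha
      · rw [decide_eq_true hc, Bool.true_and, Bool.true_and, List.all_cons,
          decide_eq_true (alnum_sub_allowed (alpha_sub_alnum hc)), Bool.true_and, dnsTailOk_eq]
        cases rest with
        | nil =>
          simp only [List.getLast?_singleton, Option.some.injEq] at hx
          subst hx
          simp only [List.all_nil, List.getLast?_nil, Bool.true_and, Bool.and_true]
          exact decide_eq_true (alpha_sub_alnum hc)
        | cons d t =>
          rw [List.getLast?_cons_cons] at hx
          rw [hx]
      · rw [decide_eq_false hc]
        simp only [Bool.false_and, Bool.and_false]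
-- ===== VERDICT (by name: the statement is the Claim_ definition above) =====
theorem check_dns_name_spec : Claim_equal_check_dns_name := by
  intro name _
  unfold Spec_check_dns_name
  rw [check_dns_name_eq_core, check_dns_name_alt_eq_core, core_eq]
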